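-- pv_equiv track=rewrite | github.com/g1tsys/coding | Day 3 - Score 100/438-surviving_nums.py | sum_of_left
-- ===== SOURCE A (Python) =====
-- def sum_of_left(nums, jump, left):
--     # 当剩余数大于等于数组长度时，直接返回数组所有元素的和
--     if left >= len(nums):
--         return sum(nums)
--
--     # 索引指针初始化为0
--     index = 0
--     # 通过数组长度减去剩余数来确定需要移除多少个元素
--     surviors = list(nums)
--
--     # 当需要移除的元素数量大于0时循环继续
--     while len(surviors)> left:
--         # 计算下一个移除元素的索引位置，由于可能循环，所以取余数
--         index = (index + jump+1) % len(surviors)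
--         # 移除该索引位置的元素
--         surviors.pop(index)
--         # 因为移除元素后，后面的元素会往前移，所以不需要更新索引
--         # 减少需要移除的元素数量
--         index-= 1
--
--     # 当移除完成后，返回剩余元素的和
--     return sum(surviors)
-- ===== SOURCE B (Python) =====
-- def sum_of_left(nums, jump, left):
--     n = len(nums)
--     total = sum(nums)
--     if left >= n:
--         return total
--     # balanced order-statistic tree: ('L', value) leaf | ('N', alive_count, l, r)
--     def build(a):
--         if len(a) == 1:
--             return ('L', a[0])
--         m = len(a) // 2
--         return ('N', len(a), build(a[:m]), build(a[m:]))
--     def cnt(t):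
--         return 1 if t[0] == 'L' else t[1]
--     def delete(t, k):
--         # remove k-th alive leaf; returns (remaining tree or None, removed value)
--         if t[0] == 'L':
--             return (None, t[1])
--         _, c, l, r = t
--         cl = cnt(l)
--         if k < cl:
--             nl, v = delete(l, k)
--             if nl is None:
--                 return (r, v)
--             return (('N', c - 1, nl, r), v)
--         nr, v = delete(r, k - cl)
--         if nr is None:
--             return (l, v)
--         return (('N', c - 1, l, nr), v)
--     t = build(nums)
--     m = n
--     p = (jump + 1) % n
--     removed = 0
--     while m > left:
--         t, v = delete(t, p)
--         removed += v
--         m -= 1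
--         if m > left:
--             p = (p + jump) % m
--     return total - removed
-- ===== Notes on version B (the rewrite author's own statement) =====
-- stated objective: faster
-- what changed: B replaces A's repeated list.pop elimination over a shrinking list by a balanced order-statistic count tree that finds and deletes the k-th survivor in O(log n), accumulating the removed sum and returning total minus removed.
import Mathlib
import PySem

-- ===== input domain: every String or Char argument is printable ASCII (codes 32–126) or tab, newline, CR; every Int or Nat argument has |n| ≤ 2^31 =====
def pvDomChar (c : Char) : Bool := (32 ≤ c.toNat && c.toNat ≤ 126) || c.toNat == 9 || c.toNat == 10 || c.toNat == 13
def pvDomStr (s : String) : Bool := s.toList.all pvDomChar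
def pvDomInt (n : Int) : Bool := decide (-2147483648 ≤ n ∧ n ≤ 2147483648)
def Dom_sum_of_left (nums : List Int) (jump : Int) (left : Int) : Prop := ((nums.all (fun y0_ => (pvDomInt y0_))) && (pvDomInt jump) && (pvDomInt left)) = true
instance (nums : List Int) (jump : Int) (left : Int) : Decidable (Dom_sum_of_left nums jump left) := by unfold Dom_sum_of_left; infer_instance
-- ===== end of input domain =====

-- B eliminates with a balanced order-statistic count tree (delete k-th survivor in O(log n))
-- instead of A's repeated list.pop; return value only (A mutates only its private copy).

-- ===== PORT A =====
-- the while-loop of A: state (surviors, index); pops at (index+jump+1) % len, then index -= 1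
def sum_of_left_loopA (jump left : Int) (surv : List Int) (index : Int) : List Int :=
  if left < (surv.length : Int) then
    let idx := PySem.Int.mod (index + jump + 1) (surv.length : Int)
    match h2 : PySem.List.pop? surv idx with
    | some r => sum_of_left_loopA jump left r.2 (idx - 1)
    | none => surv   -- IndexError: unreachable, idx = _ % len ∈ [0, len)
  else surv
termination_by surv.length
decreasing_by
  have := PySem.List.length_of_pop?_eq_some surv h2
  omega

def sum_of_left (nums : List Int) (jump : Int) (left : Int) : Int :=
  if left ≥ (nums.length : Int) then nums.sum
  else (sum_of_left_loopA jump left nums 0).sum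

-- ===== PORT B =====
-- the ('L', v) / ('N', c, l, r) tuples of Source B
inductive BTree where
  | leaf (v : Int)
  | node (c : Nat) (l : BTree) (r : BTree)
deriving Repr, DecidableEq

def bCnt : BTree → Nat
  | .leaf _ => 1
  | .node c _ _ => c

-- build(a) of Source B (Source B only calls it on non-empty a; the `≤ 1` guard makes it total on [])
def bBuild (a : List Int) : BTree :=
  if a.length ≤ 1 then .leaf (a.headD 0)
  else
    let m := a.length / 2
    .node a.length (bBuild (a.take m)) (bBuild (a.drop m))
termination_by a.length
decreasing_by
  · simp only [List.length_take]; omega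
  · simp only [List.length_drop]; omega

-- delete(t, k) of Source B: remove the k-th leaf, return the remaining tree (none = emptied) and the value
def bDelete : BTree → Int → Option BTree × Int
  | .leaf v, _ => (none, v)
  | .node c l r, k =>
    if k < (bCnt l : Int) then
      match bDelete l k with
      | (none, v) => (some r, v)
      | (some nl, v) => (some (.node (c - 1) nl r), v)
    else
      match bDelete r (k - (bCnt l : Int)) with
      | (none, v) => (some l, v)
      | (some nr, v) => (some (.node (c - 1) l nr), v)

-- leaf count: termination measure for the while-loop below (bDelete strictly shrinks it)
def bLeaves : BTree → Nat
  | .leaf _ => 1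
  | .node _ l r => bLeaves l + bLeaves r

theorem bLeaves_pos (t : BTree) : 0 < bLeaves t := by
  induction t with
  | leaf v => simp [bLeaves]
  | node c l r ihl ihr => simp [bLeaves]; omega

theorem bDelete_leaves (t : BTree) : ∀ (k : Int) (t' : BTree) (v : Int),
    bDelete t k = (some t', v) → bLeaves t' < bLeaves t := by
  induction t with
  | leaf v => intro k t' v' h; simp [bDelete] at h
  | node c l r ihl ihr =>
    intro k t' v' h
    simp only [bDelete] at h
    split at h
    · cases hd : bDelete l k with
      | mk o v2 =>
        cases o with
        | none => rw [hd] at h; simp at h; obtain ⟨h1, h2⟩ := h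
                  subst h1; have := bLeaves_pos l; simp [bLeaves]; omega
        | some nl => rw [hd] at h; simp at h; obtain ⟨h1, h2⟩ := h
                     subst h1; have := ihl _ _ _ hd; simp [bLeaves]; omega
    · cases hd : bDelete r (k - (bCnt l : Int)) with
      | mk o v2 =>
        cases o with
        | none => rw [hd] at h; simp at h; obtain ⟨h1, h2⟩ := h
                  subst h1; have := bLeaves_pos r; simp [bLeaves]; omega
        | some nr => rw [hd] at h; simp at h; obtain ⟨h1, h2⟩ := h
                     subst h1; have := ihr _ _ _ hd; simp [bLeaves]; omega

-- the while-loop of Source B: state (t, m, p, removed)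
def bLoop (jump left : Int) (t : Option BTree) (m : Nat) (p removed : Int) : Int :=
  if left < (m : Int) then
    match t with
    | none => removed   -- delete(None, p) raises in Python: unreachable junk value
    | some tt =>
      match h2 : bDelete tt p with
      | (t', v) =>
        bLoop jump left t' (m - 1)
          (if left < (m : Int) - 1 then PySem.Int.mod (p + jump) ((m : Int) - 1) else p)
          (removed + v)
  else removed
termination_by (match t with | none => 0 | some tt => bLeaves tt)
decreasing_by
  cases t' with
  | none => simp; exact bLeaves_pos tt
  | some t2 => simp; exact bDelete_leaves tt _ _ _ h2

def sum_of_left_alt (nums : List Int) (jump : Int) (left : Int) : Int :=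
  let n := nums.length
  let total := nums.sum
  if left ≥ (n : Int) then total
  else total - bLoop jump left (some (bBuild nums)) n (PySem.Int.mod (jump + 1) (n : Int)) 0

-- ===== PRECONDITION & SPEC =====
-- A raises ZeroDivisionError ('% 0' once the list is emptied) exactly when left < 0; B raises there too.
def Pre_sum_of_left (nums : List Int) (jump : Int) (left : Int) : Prop := 0 ≤ left
instance (nums : List Int) (jump : Int) (left : Int) : Decidable (Pre_sum_of_left nums jump left) := by
  unfold Pre_sum_of_left; infer_instance
def pvWitness_sum_of_left : List Int × Int × Int := ([1, 2, 3], 1, 1)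

def Spec_sum_of_left (nums : List Int) (jump : Int) (left : Int) (out : Int) : Prop := out = sum_of_left_alt nums jump left
instance (nums : List Int) (jump : Int) (left : Int) (out : Int) : Decidable (Spec_sum_of_left nums jump left out) := by unfold Spec_sum_of_left; infer_instance

-- ===== CLAIM (what is proved, stated in full; the proofs are below) =====
def Claim_equal_sum_of_left : Prop := ∀ (nums : List Int) (jump : Int) (left : Int), Dom_sum_of_left nums jump left → Pre_sum_of_left nums jump left → Spec_sum_of_left nums jump left (sum_of_left nums jump left)

-- ===== LEMMAS AND PROOFS =====

-- the list of leaf values, in order; invariant: it equals A's current `surviors`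
def bList : BTree → List Int
  | .leaf v => [v]
  | .node _ l r => bList l ++ bList r

-- the counts cached in the nodes are correct
def bWf : BTree → Prop
  | .leaf _ => True
  | .node c l r => c = (bList l).length + (bList r).length ∧ bWf l ∧ bWf r

theorem bCnt_eq (t : BTree) (h : bWf t) : bCnt t = (bList t).length := by
  cases t with
  | leaf v => simp [bCnt, bList]
  | node c l r => simp [bCnt, bList]; exact h.1

theorem bBuild_spec (a : List Int) (ha : a ≠ []) : bList (bBuild a) = a ∧ bWf (bBuild a) := by
  fun_induction bBuild a with
  | case1 a h =>
    match a, ha with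
    | [x], _ => simp [bList, bWf]
  | case2 a h m ih1 ih2 =>
    have hm : m = a.length / 2 := rfl
    have h1 : m < a.length := by omega
    have h2 : 1 ≤ m := by omega
    have ht : a.take m ≠ [] := by
      simp only [ne_eq, List.take_eq_nil_iff, not_or]
      exact ⟨by omega, fun hc => by simp [hc] at h1⟩
    have hd : a.drop m ≠ [] := by
      simp only [ne_eq, List.drop_eq_nil_iff, not_le]; omega
    obtain ⟨e1, w1⟩ := ih1 ht
    obtain ⟨e2, w2⟩ := ih2 hd
    refine ⟨?_, ?_, w1, w2⟩
    · simp [bList, e1, e2]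
    · simp [e1, e2, List.length_take, List.length_drop]; omega

theorem bDelete_spec (t : BTree) : ∀ (k : Int), bWf t → 0 ≤ k → k < ((bList t).length : Int) →
    (bDelete t k).2 = (bList t).getD k.toNat 0 ∧
    (match (bDelete t k).1 with
     | none => (bList t).length = 1
     | some t' => bWf t' ∧ bList t' = (bList t).eraseIdx k.toNat) := by
  induction t with
  | leaf v =>
    intro k _ hk0 hk1
    simp [bList] at hk1
    have : k = 0 := by omega
    subst this
    simp [bDelete, bList]
  | node c l r ihl ihr =>
    intro k hwf hk0 hk1
    obtain ⟨hc, hwl, hwr⟩ := hwf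
    have hcl : bCnt l = (bList l).length := bCnt_eq l hwl
    simp only [bList] at hk1 ⊢
    by_cases hlt : k < (bCnt l : Int)
    · -- delete in left subtree
      have hkl : k < ((bList l).length : Int) := by omega
      obtain ⟨hv, hrest⟩ := ihl k hwl hk0 hkl
      have hjl : k.toNat < (bList l).length := by omega
      have hval : (bList l ++ bList r).getD k.toNat 0 = (bList l).getD k.toNat 0 :=
        List.getD_append _ _ _ _ hjl
      have herase : (bList l ++ bList r).eraseIdx k.toNat = (bList l).eraseIdx k.toNat ++ bList r :=
        List.eraseIdx_append_of_lt_length hjl _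
      simp only [bDelete, if_pos hlt]
      cases hd : bDelete l k with
      | mk o v =>
        rw [hd] at hv hrest
        cases o with
        | none =>
          simp only at hrest hv
          obtain ⟨x, hx⟩ := List.length_eq_one_iff.mp hrest
          have hk : k = 0 := by omega
          subst hk
          simp only [hx] at hv ⊢
          simp only [hv]
          exact ⟨by simp, hwr, by simp⟩
        | some t' =>
          simp only at hrest hv
          obtain ⟨hwt', hlt'⟩ := hrest
          refine ⟨by rw [hval] at *; exact hv, ?_, ?_⟩
          · constructor
            · have : (bList t').length = (bList l).length - 1 := by
                rw [hlt', List.length_eraseIdx_of_lt hjl]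
              omega
            · exact ⟨hwt', hwr⟩
          · simp only [bList, hlt', herase]
    · -- delete in right subtree
      have hkr0 : 0 ≤ k - (bCnt l : Int) := by omega
      have hlen : (bList l ++ bList r).length = (bList l).length + (bList r).length :=
        List.length_append
      have hkr : k - (bCnt l : Int) < ((bList r).length : Int) := by omega
      obtain ⟨hv, hrest⟩ := ihr (k - (bCnt l : Int)) hwr hkr0 hkr
      have hj : k.toNat = (bList l).length + (k - (bCnt l : Int)).toNat := by omega
      have hval : (bList l ++ bList r).getD k.toNat 0 = (bList r).getD (k - (bCnt l : Int)).toNat 0 := by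
        rw [List.getD_append_right _ _ _ _ (by omega)]
        congr 1; omega
      have herase : (bList l ++ bList r).eraseIdx k.toNat
          = bList l ++ (bList r).eraseIdx (k - (bCnt l : Int)).toNat := by
        rw [List.eraseIdx_append_of_length_le (by omega)]
        have : k.toNat - (bList l).length = (k - (bCnt l : Int)).toNat := by omega
        rw [this]
      simp only [bDelete, if_neg hlt]
      cases hd : bDelete r (k - (bCnt l : Int)) with
      | mk o v =>
        rw [hd] at hv hrest
        cases o with
        | none =>
          simp only at hrest hv
          obtain ⟨x, hx⟩ := List.length_eq_one_iff.mp hrest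
          have hk2 : (k - (bCnt l : Int)).toNat = 0 := by omega
          simp only [hk2, hx] at hv herase hval ⊢
          simp only [hv]
          exact ⟨hval.symm, hwl, by simp [herase, List.eraseIdx]⟩
        | some t' =>
          simp only at hrest hv
          obtain ⟨hwt', hlt'⟩ := hrest
          have hjr : (k - (bCnt l : Int)).toNat < (bList r).length := by omega
          refine ⟨by rw [hval] at *; exact hv, ?_, ?_⟩
          · constructor
            · have : (bList t').length = (bList r).length - 1 := by
                rw [hlt', List.length_eraseIdx_of_lt hjr]
              omega
            · exact ⟨hwl, hwt'⟩
          · simp only [bList, hlt', herase]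

theorem sum_erase (l : List Int) (n : Nat) (h : n < l.length) :
    (l.eraseIdx n).sum + l.getD n 0 = l.sum := by
  induction l generalizing n with
  | nil => simp at h
  | cons x xs ih =>
    cases n with
    | zero => simp [List.eraseIdx]; ring
    | succ n =>
      simp only [List.eraseIdx, List.sum_cons, List.getD_cons_succ]
      have := ih n (by simpa using h)
      omega

theorem loop_eq (jump left : Int) (hl : 0 ≤ left) :
    ∀ (m : Nat) (surv : List Int) (t : BTree) (index p removed : Int),
    bWf t → bList t = surv → m = surv.length →
    (left < (m : Int) → p = PySem.Int.mod (index + jump + 1) (m : Int)) →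
    bLoop jump left (some t) m p removed
      = removed + (surv.sum - (sum_of_left_loopA jump left surv index).sum) := by
  intro m
  induction m using Nat.strong_induction_on with
  | _ m ih =>
    intro surv t index p removed hwf hls hms hp
    subst hms
    by_cases hcond : left < (surv.length : Int)
    · have hm1 : 1 ≤ surv.length := by omega
      have hmpos : (0 : Int) < (surv.length : Int) := by omega
      have hpv := hp hcond
      set idx := PySem.Int.mod (index + jump + 1) (surv.length : Int) with hidx
      have hidx0 : 0 ≤ idx := PySem.Int.mod_nonneg _ hmpos
      have hidxm : idx < (surv.length : Int) := PySem.Int.mod_lt _ hmpos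
      have hjm : idx.toNat < surv.length := by omega
      have hpop := PySem.List.pop?_natCast surv idx.toNat hjm
      have hcast : ((idx.toNat : Nat) : Int) = idx := by omega
      rw [hcast] at hpop
      have hA : sum_of_left_loopA jump left surv index
          = sum_of_left_loopA jump left (surv.eraseIdx idx.toNat) (idx - 1) := by
        have hpop' : PySem.List.pop? surv (PySem.Int.mod (index + jump + 1) (surv.length : Int))
            = some (surv[idx.toNat]'hjm, surv.eraseIdx idx.toNat) := by
          rw [← hidx]; exact hpop
        rw [sum_of_left_loopA]
        simp only [if_pos hcond]
        split
        · rename_i r heq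
          rw [hpop'] at heq
          cases heq
          rw [← hidx]
        · rename_i heq
          rw [hpop'] at heq
          cases heq
      have hkb : idx < ((bList t).length : Int) := by rw [hls]; omega
      obtain ⟨hv, hrest⟩ := bDelete_spec t idx hwf hidx0 hkb
      have hsum : (surv.eraseIdx idx.toNat).sum + surv.getD idx.toNat 0 = surv.sum :=
        sum_erase surv idx.toNat hjm
      have hlenE : (surv.eraseIdx idx.toNat).length = surv.length - 1 :=
        List.length_eraseIdx_of_lt hjm
      rw [bLoop]
      simp only [if_pos hcond]
      rw [hpv]
      cases hd : bDelete t idx with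
      | mk o v =>
        rw [hd] at hv hrest
        simp only at hv hrest
        have hvv : v = surv.getD idx.toNat 0 := by
          rw [hv, hls]
        cases o with
        | none =>
          rw [hls] at hrest
          have hm1' : surv.length = 1 := hrest
          rw [bLoop]
          have hc0 : ¬ left < ((surv.length - 1 : Nat) : Int) := by
            rw [hm1']; simpa using hl
          simp only [if_neg hc0]
          rw [hA, sum_of_left_loopA]
          have hc0' : ¬ left < (((surv.eraseIdx idx.toNat).length : Nat) : Int) := by
            rw [hlenE]; exact hc0
          simp only [if_neg hc0']
          have hz : (surv.eraseIdx idx.toNat).length = 0 := by omega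
          rw [List.length_eq_zero_iff.mp hz] at hsum ⊢
          simp only [List.sum_nil] at hsum ⊢
          omega
        | some t' =>
          obtain ⟨hwt', hlst'⟩ := hrest
          rw [hls] at hlst'
          have hIH := ih (surv.length - 1) (by omega) (surv.eraseIdx idx.toNat) t' (idx - 1)
            (if left < ((surv.length : Nat) : Int) - 1 then
               PySem.Int.mod (idx + jump) (((surv.length : Nat) : Int) - 1) else idx)
            (removed + v) hwt' hlst' (by omega) ?_
          · rw [hIH, hA]
            omega
          · intro hlt
            have hcast2 : ((surv.length - 1 : Nat) : Int) = ((surv.length : Nat) : Int) - 1 := by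
              omega
            rw [hcast2] at hlt ⊢
            simp only [if_pos hlt]
            congr 1
            omega
    · rw [bLoop]
      simp only [if_neg hcond]
      rw [sum_of_left_loopA]
      simp only [if_neg hcond]
      ring



theorem main_eq (nums : List Int) (jump : Int) (left : Int) (hpre : 0 ≤ left) :
    sum_of_left nums jump left = sum_of_left_alt nums jump left := by
  unfold sum_of_left sum_of_left_alt
  by_cases hge : left ≥ (nums.length : Int)
  · simp [hge]
  · simp only [if_neg hge]
    have hne : nums ≠ [] := by
      intro hc; rw [hc] at hge; simp at hge; omega
    obtain ⟨hbl, hbw⟩ := bBuild_spec nums hne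
    have hmain := loop_eq jump left hpre nums.length nums (bBuild nums) 0
      (PySem.Int.mod (jump + 1) (nums.length : Int)) 0 hbw hbl rfl
      (by intro _; norm_num)
    rw [hmain]
    ring

-- ===== VERDICT (by name: the statement is the Claim_ definition above) =====
theorem sum_of_left_spec : Claim_equal_sum_of_left := by
  intro nums jump left _ hpre
  unfold Spec_sum_of_left
  exact main_eq nums jump left hpre
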